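-- pv_equiv track=rewrite | github.com/yaroshevych/desktopctl | src/desktop/scripts/dev/tokenize_ai_verify.py | verdict_for
-- ===== SOURCE A (Python) =====
-- from typing import Any
--
-- def verdict_for(payload: dict[str, Any], corrections: int, issues: list[str]) -> tuple[str, list[str]]:
--     elements = payload.get("windows", [{}])[0].get("elements", [])
--     text_count = sum(1 for e in elements if e.get("type") == "text")
--     box_count = sum(1 for e in elements if e.get("type") == "box")
--     glyph_count = sum(1 for e in elements if e.get("type") == "glyph")
--
--     reasons = list(issues)
--     verdict = "accept"
--     if text_count < 2:
--         verdict = "needs_human_review"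
--         reasons.append("too_few_text_tokens")
--     if box_count < max(1, text_count // 4):
--         verdict = "needs_human_review"
--         reasons.append("box_coverage_low")
--     if glyph_count > 140:
--         verdict = "needs_human_review"
--         reasons.append("glyph_count_high")
--     if corrections > 20:
--         verdict = "needs_human_review"
--         reasons.append("many_auto_corrections")
--     return verdict, sorted(set(reasons))
-- ===== SOURCE B (Python) =====
-- def verdict_for(payload, corrections, issues):
--     elements = payload.get("windows", [{}])[0].get("elements", [])
--
--     text_count = box_count = glyph_count = 0
--     for e in elements:
--         t = e.get("type")
--         if t == "text":
--             text_count += 1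
--         elif t == "box":
--             box_count += 1
--         elif t == "glyph":
--             glyph_count += 1
--
--     fired = []
--     if text_count < 2:
--         fired.append("too_few_text_tokens")
--     if box_count < max(1, text_count // 4):
--         fired.append("box_coverage_low")
--     if glyph_count > 140:
--         fired.append("glyph_count_high")
--     if corrections > 20:
--         fired.append("many_auto_corrections")
--
--     verdict = "needs_human_review" if fired else "accept"
--
--     # deduplicate without a set: sort once, then drop adjacent repeats
--     out = []
--     for r in sorted(issues + fired):
--         if not out or out[-1] != r:
--             out.append(r)
--     return verdict, out
-- ===== Notes on version B (the rewrite author's own statement) =====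
-- stated objective: alternative
-- what changed: B makes one three-counter pass over the elements instead of three scans, collects the fired reasons into a list from which the verdict is derived instead of mutating the verdict in four blocks, and deduplicates by sorting issues+fired once and dropping adjacent repeats instead of building a set and sorting it.
-- outside the precondition, e.g. on verdict_for({'windows': []}, 0, []): A raises IndexError, B raises IndexError
import Mathlib
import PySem

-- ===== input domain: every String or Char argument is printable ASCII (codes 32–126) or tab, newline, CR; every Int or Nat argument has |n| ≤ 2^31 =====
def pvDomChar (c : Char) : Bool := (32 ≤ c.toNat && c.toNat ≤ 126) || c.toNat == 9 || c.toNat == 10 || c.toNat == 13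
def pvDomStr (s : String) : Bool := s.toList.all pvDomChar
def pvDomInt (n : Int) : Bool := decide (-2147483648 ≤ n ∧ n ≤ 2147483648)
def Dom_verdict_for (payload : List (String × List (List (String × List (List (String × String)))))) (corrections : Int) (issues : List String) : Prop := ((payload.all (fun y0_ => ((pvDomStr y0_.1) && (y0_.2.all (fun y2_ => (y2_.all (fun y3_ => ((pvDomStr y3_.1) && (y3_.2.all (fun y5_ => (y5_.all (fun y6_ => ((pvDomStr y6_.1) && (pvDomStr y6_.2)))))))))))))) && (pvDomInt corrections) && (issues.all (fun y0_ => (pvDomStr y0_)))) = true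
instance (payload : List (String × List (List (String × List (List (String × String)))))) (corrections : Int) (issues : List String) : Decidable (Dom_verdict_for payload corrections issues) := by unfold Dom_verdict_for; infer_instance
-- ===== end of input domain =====

-- B makes one three-counter pass over the elements instead of three scans, derives the
-- verdict from the list of fired reasons instead of mutating it in four blocks, and
-- deduplicates by sorting issues+fired once and dropping adjacent repeats instead of
-- building a set and sorting it (objective: alternative).
-- NOTE: both A and B raise IndexError when payload["windows"] is present and empty — Pre_ excludes that.

-- ===== PORT A =====
def verdict_for (payload : List (String × List (List (String × List (List (String × String)))))) (corrections : Int) (issues : List String) : String × List String :=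
  let windows := (PySem.Dict.mk payload).getD "windows" [[]]
  -- windows[0] raises IndexError when windows = []; that input is outside Pre_
  let w := (PySem.List.pyGet? windows 0).getD []
  let elements := (PySem.Dict.mk w).getD "elements" []
  let text_count : Int := elements.foldl (fun acc e => if (PySem.Dict.mk e).get? "type" == some "text" then acc + 1 else acc) 0
  let box_count : Int := elements.foldl (fun acc e => if (PySem.Dict.mk e).get? "type" == some "box" then acc + 1 else acc) 0
  let glyph_count : Int := elements.foldl (fun acc e => if (PySem.Dict.mk e).get? "type" == some "glyph" then acc + 1 else acc) 0
  let reasons := issues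
  let verdict := "accept"
  let vr := if text_count < 2 then ("needs_human_review", reasons ++ ["too_few_text_tokens"]) else (verdict, reasons)
  let vr := if box_count < max 1 (PySem.Int.floordiv text_count 4) then ("needs_human_review", vr.2 ++ ["box_coverage_low"]) else vr
  let vr := if glyph_count > 140 then ("needs_human_review", vr.2 ++ ["glyph_count_high"]) else vr
  let vr := if corrections > 20 then ("needs_human_review", vr.2 ++ ["many_auto_corrections"]) else vr
  (vr.1, PySem.List.sorted (PySem.Set.ofList vr.2) (fun x => x) false)

-- ===== PORT B =====
def verdict_for_alt (payload : List (String × List (List (String × List (List (String × String)))))) (corrections : Int) (issues : List String) : String × List String :=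
  let windows := (PySem.Dict.mk payload).getD "windows" [[]]
  let w := (PySem.List.pyGet? windows 0).getD []
  let elements := (PySem.Dict.mk w).getD "elements" []
  -- one pass, three counters (the if/elif/elif chain of Source B)
  -- t = e.get("type") is inlined into the three comparisons
  let cnts : Int × Int × Int := elements.foldl (fun c e =>
      if (PySem.Dict.mk e).get? "type" = some "text" then (c.1 + 1, c.2.1, c.2.2)
      else if (PySem.Dict.mk e).get? "type" = some "box" then (c.1, c.2.1 + 1, c.2.2)
      else if (PySem.Dict.mk e).get? "type" = some "glyph" then (c.1, c.2.1, c.2.2 + 1)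
      else c) (0, 0, 0)
  let text_count := cnts.1
  let box_count := cnts.2.1
  let glyph_count := cnts.2.2
  let fired : List String := []
  let fired := if text_count < 2 then fired ++ ["too_few_text_tokens"] else fired
  let fired := if box_count < max 1 (PySem.Int.floordiv text_count 4) then fired ++ ["box_coverage_low"] else fired
  let fired := if glyph_count > 140 then fired ++ ["glyph_count_high"] else fired
  let fired := if corrections > 20 then fired ++ ["many_auto_corrections"] else fired
  let verdict := if fired.isEmpty then "accept" else "needs_human_review"
  -- dedupe: sort once, drop adjacent repeats ("if not out or out[-1] != r: out.append(r)")
  let out := (PySem.List.sorted (issues ++ fired) (fun x => x) false).foldl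
      (fun out r => if out.isEmpty || !(out.getLast? == some r) then out ++ [r] else out) []
  (verdict, out)

-- ===== PRECONDITION & SPEC =====
-- Pre_ excludes the inputs where the Python A raises IndexError: a "windows" entry whose value is the empty list.
def Pre_verdict_for (payload : List (String × List (List (String × List (List (String × String)))))) (corrections : Int) (issues : List String) : Prop :=
  (PySem.Dict.mk payload).getD "windows" [[]] ≠ []
instance (payload : List (String × List (List (String × List (List (String × String)))))) (corrections : Int) (issues : List String) : Decidable (Pre_verdict_for payload corrections issues) := by unfold Pre_verdict_for; infer_instance

def pvWitness_verdict_for : (List (String × List (List (String × List (List (String × String)))))) × Int × List String :=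
  ([("windows", [[("elements", [[("type", "text")], [("type", "box")], [("type", "text")]])]])], 0, ["x"])

def Spec_verdict_for (payload : List (String × List (List (String × List (List (String × String)))))) (corrections : Int) (issues : List String) (out : String × List String) : Prop := out = verdict_for_alt payload corrections issues
instance (payload : List (String × List (List (String × List (List (String × String)))))) (corrections : Int) (issues : List String) (out : String × List String) : Decidable (Spec_verdict_for payload corrections issues out) := by unfold Spec_verdict_for; infer_instance

-- ===== CLAIM =====
def Claim_equal_verdict_for : Prop := ∀ (payload : List (String × List (List (String × List (List (String × String)))))) (corrections : Int) (issues : List String), Dom_verdict_for payload corrections issues → Pre_verdict_for payload corrections issues → Spec_verdict_for payload corrections issues (verdict_for payload corrections issues)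

-- ===== LEMMAS AND PROOFS =====

-- A's conditional-add-one fold counts the elements whose mapped value is t.
theorem pv_foldl_count_eq {α β : Type} [BEq β] (f : α → β) (t : β) (l : List α) (acc : Int) :
    l.foldl (fun acc e => if f e == t then acc + 1 else acc) acc = acc + ((l.map f).count t : Int) := by
  induction l generalizing acc with
  | nil => simp
  | cons x xs ih =>
    simp only [List.foldl_cons, List.map_cons, ih, List.count_cons]
    by_cases h : f x == t
    · simp [h]; ring
    · simp [h]

-- B's single three-counter pass produces the three counts of A's three scans.
theorem pv_triple_eq {α : Type} (f : α → Option String) (l : List α) (a b g : Int) :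
    l.foldl (fun (c : Int × Int × Int) e =>
        if f e = some "text" then (c.1 + 1, c.2.1, c.2.2)
        else if f e = some "box" then (c.1, c.2.1 + 1, c.2.2)
        else if f e = some "glyph" then (c.1, c.2.1, c.2.2 + 1)
        else c) (a, b, g)
      = (a + ((l.map f).count (some "text") : Int),
         b + ((l.map f).count (some "box") : Int),
         g + ((l.map f).count (some "glyph") : Int)) := by
  induction l generalizing a b g with
  | nil => simp
  | cons x xs ih =>
    rw [List.foldl_cons]
    by_cases h1 : f x = some "text"
    · rw [if_pos h1, ih, List.map_cons, h1]
      simp [Prod.ext_iff]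
      omega
    · rw [if_neg h1]
      by_cases h2 : f x = some "box"
      · rw [if_pos h2, ih, List.map_cons, h2]
        simp [Prod.ext_iff]
        omega
      · rw [if_neg h2]
        by_cases h3 : f x = some "glyph"
        · rw [if_pos h3, ih, List.map_cons, h3]
          simp [Prod.ext_iff]
          omega
        · rw [if_neg h3, ih, List.map_cons]
          simp [h1, h2, h3]

-- in a strictly increasing list, every member is ≤ the last element
theorem pv_mem_le_getLast (l : List String) (hp : l.Pairwise (· < ·)) (a : String)
    (ha : a ∈ l) (m : String) (hm : l.getLast? = some m) : a ≤ m := by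
  induction l with
  | nil => cases ha
  | cons x xs ih =>
    cases xs with
    | nil =>
      simp only [List.getLast?_singleton, Option.some.injEq] at hm
      simp only [List.mem_singleton] at ha
      subst hm; subst ha; exact le_refl _
    | cons y ys =>
      rw [List.getLast?_cons_cons] at hm
      rcases List.mem_cons.mp ha with h | h
      · subst h
        have hmem : m ∈ y :: ys := List.mem_of_getLast? hm
        exact le_of_lt ((List.pairwise_cons.mp hp).1 m hmem)
      · exact ih (List.pairwise_cons.mp hp).2 h hm

-- the adjacent-dedupe fold: invariant (strictly increasing accumulator, members = acc ∪ input)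
theorem pv_scan_spec (l : List String) : ∀ (acc : List String),
    acc.Pairwise (· < ·) → (∀ a ∈ acc, ∀ b ∈ l, a ≤ b) → l.Pairwise (· ≤ ·) →
    (l.foldl (fun out r => if out.isEmpty || !(out.getLast? == some r) then out ++ [r] else out) acc).Pairwise (· < ·) ∧
    (∀ x, x ∈ l.foldl (fun out r => if out.isEmpty || !(out.getLast? == some r) then out ++ [r] else out) acc ↔ x ∈ acc ∨ x ∈ l) := by
  induction l with
  | nil => intro acc hpw _ _; exact ⟨hpw, by simp⟩
  | cons r l ih =>
    intro acc hpw hle hsor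
    have hlsor : l.Pairwise (· ≤ ·) := (List.pairwise_cons.mp hsor).2
    have hrle : ∀ b ∈ l, r ≤ b := (List.pairwise_cons.mp hsor).1
    simp only [List.foldl_cons]
    by_cases hc : (acc.isEmpty || !(acc.getLast? == some r)) = true
    · -- append r
      rw [if_pos hc]
      have haccr : ∀ a ∈ acc, a < r := by
        intro a ha
        have h1 : a ≤ r := hle a ha r (List.mem_cons_self)
        rcases lt_or_eq_of_le h1 with h | h
        · exact h
        · exfalso
          subst h
          have hne : ¬ acc.isEmpty := by simp [List.isEmpty_iff]; rintro rfl; cases ha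
          obtain ⟨m, hm⟩ : ∃ m, acc.getLast? = some m := by
            cases h : acc.getLast? with
            | none => exfalso; exact hne (by simpa [List.isEmpty_iff, List.getLast?_eq_none_iff] using h)
            | some m => exact ⟨m, rfl⟩
          have h2 : m ≤ a := hle m (List.mem_of_getLast? hm) a (List.mem_cons_self)
          have h3 : a ≤ m := pv_mem_le_getLast acc hpw a ha m hm
          have : m = a := le_antisymm h2 h3
          simp [hne, hm, this] at hc
      have hpw' : (acc ++ [r]).Pairwise (· < ·) := by
        rw [List.pairwise_append]
        exact ⟨hpw, by simp, by intro a ha b hb; simp at hb; subst hb; exact haccr a ha⟩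
      have hle' : ∀ a ∈ acc ++ [r], ∀ b ∈ l, a ≤ b := by
        intro a ha b hb
        rcases List.mem_append.mp ha with h | h
        · exact hle a h b (List.mem_cons_of_mem _ hb)
        · simp at h; subst h; exact hrle b hb
      obtain ⟨h1, h2⟩ := ih (acc ++ [r]) hpw' hle' hlsor
      refine ⟨h1, fun x => ?_⟩
      rw [h2 x]
      simp [or_assoc, or_comm, or_left_comm]
    · -- skip r (r equals the last element of acc, so r ∈ acc)
      rw [if_neg hc]
      have hne : acc.isEmpty = false := by
        cases h : acc.isEmpty; rfl; simp [h] at hc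
      have hlast : acc.getLast? = some r := by
        cases h : acc.getLast? with
        | none => exfalso; rw [List.getLast?_eq_none_iff] at h; simp [h] at hne
        | some m =>
          simp [hne, h] at hc
          rw [hc]
      have hr : r ∈ acc := List.mem_of_getLast? hlast
      obtain ⟨h1, h2⟩ := ih acc hpw (fun a ha b hb => hle a ha b (List.mem_cons_of_mem _ hb)) hlsor
      refine ⟨h1, fun x => ?_⟩
      rw [h2 x]
      constructor
      · rintro (h | h)
        · exact Or.inl h
        · exact Or.inr (List.mem_cons_of_mem _ h)
      · rintro (h | h)
        · exact Or.inl h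
        · rcases List.mem_cons.mp h with h | h
          · exact Or.inl (h ▸ hr)
          · exact Or.inr h

-- sorting the distinct elements equals sorting everything and dropping adjacent repeats
theorem pv_sorted_set_eq_scan (L : List String) :
    PySem.List.sorted (PySem.Set.ofList L) (fun x => x) false
      = (PySem.List.sorted L (fun x => x) false).foldl
          (fun out r => if out.isEmpty || !(out.getLast? == some r) then out ++ [r] else out) [] := by
  obtain ⟨hpw, hmem⟩ := pv_scan_spec (PySem.List.sorted L (fun x => x) false) []
    (by simp) (by simp) (by simpa using PySem.List.sorted_pairwise L (fun x => x))
  apply PySem.List.sorted_eq_of_perm_of_pairwise_lt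
  · apply List.perm_of_nodup_nodup_toFinset_eq
    · exact hpw.imp ne_of_lt
    · exact PySem.Set.nodup_ofList L
    · ext x
      rw [List.mem_toFinset, List.mem_toFinset, hmem x]
      simp [PySem.List.mem_sorted, PySem.Set.mem_ofList]
  · exact hpw

-- ===== VERDICT =====
theorem verdict_for_spec : Claim_equal_verdict_for := by
  intro payload corrections issues _ _
  unfold Spec_verdict_for verdict_for verdict_for_alt
  simp only [pv_foldl_count_eq, pv_triple_eq, pv_sorted_set_eq_scan, zero_add]
  split_ifs <;> simp_all [List.append_assoc]
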